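-- pv_equiv track=rewrite | github.com/PatriciaBurtic/LaboratorAI | p10.py | numaraUnu
-- ===== SOURCE A (Python) =====
-- def numaraUnu(linie):
--     #Complexitate O(n)
--     nr = 0
--     for cifra in linie[::-1]:
--         if cifra == 0:
--             return nr
--         else:
--             nr = nr+1
--     return nr
-- ===== SOURCE B (Python) =====
-- def numaraUnu(linie):
--     # Single forward pass: reset counter on zero, increment otherwise.
--     nr = 0
--     for cifra in linie:
--         if cifra == 0:
--             nr = 0
--         else:
--             nr = nr + 1
--     return nr
-- ===== Notes on version B (the rewrite author's own statement) =====
-- stated objective: simpler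
-- what changed: B replaces A's reversed copy with early return by a single forward pass that resets a counter on each zero and increments otherwise.
import Mathlib
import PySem

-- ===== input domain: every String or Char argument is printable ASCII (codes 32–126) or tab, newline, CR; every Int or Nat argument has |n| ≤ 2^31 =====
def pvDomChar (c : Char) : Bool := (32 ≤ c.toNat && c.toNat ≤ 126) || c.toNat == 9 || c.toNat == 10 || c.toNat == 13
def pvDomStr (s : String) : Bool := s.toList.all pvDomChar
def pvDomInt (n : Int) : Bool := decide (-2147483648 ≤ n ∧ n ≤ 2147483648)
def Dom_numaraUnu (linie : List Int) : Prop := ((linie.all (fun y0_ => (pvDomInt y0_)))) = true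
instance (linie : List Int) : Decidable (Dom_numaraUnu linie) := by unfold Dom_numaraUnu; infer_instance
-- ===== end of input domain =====

-- B changes the traversal: one forward pass with a reset-on-zero counter instead of A's reversed scan with early return (objective: simpler).

-- ===== PORT A =====
-- loop over linie[::-1] with early return on a zero
def numaraUnuGo (xs : List Int) (nr : Int) : Int :=
  match xs with
  | [] => nr
  | cifra :: rest => if cifra = 0 then nr else numaraUnuGo rest (nr + 1)

def numaraUnu (linie : List Int) : Int :=
  match PySem.List.slice? linie none none (-1) with   -- linie[::-1]; step -1 ≠ 0 so always some
  | some xs => numaraUnuGo xs 0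
  | none => 0

-- ===== PORT B =====
def numaraUnu_alt (linie : List Int) : Int :=
  linie.foldl (fun nr cifra => if cifra = 0 then 0 else nr + 1) 0

-- ===== PRECONDITION & SPEC =====
def Spec_numaraUnu (linie : List Int) (out : Int) : Prop := out = numaraUnu_alt linie
instance (linie : List Int) (out : Int) : Decidable (Spec_numaraUnu linie out) := by unfold Spec_numaraUnu; infer_instance

-- ===== CLAIM (what is proved, stated in full; the proofs are below) =====
def Claim_equal_numaraUnu : Prop := ∀ (linie : List Int), Dom_numaraUnu linie → Spec_numaraUnu linie (numaraUnu linie)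

-- ===== LEMMAS AND PROOFS =====

theorem numaraUnuGo_shift (xs : List Int) (nr : Int) :
    numaraUnuGo xs nr = numaraUnuGo xs 0 + nr := by
  induction xs generalizing nr with
  | nil => simp [numaraUnuGo]
  | cons c rest ih =>
    by_cases h : c = 0
    · simp [numaraUnuGo, h]
    · simp only [numaraUnuGo, if_neg h]
      rw [ih (nr + 1), ih (0 + 1)]
      ring

theorem slice_rev (l : List Int) :
    PySem.List.slice? l none none (-1) = some l.reverse :=
  PySem.List.slice?_none_none_neg_one l

theorem main_eq (l : List Int) :
    numaraUnuGo l.reverse 0 = l.foldl (fun nr cifra => if cifra = 0 then 0 else nr + 1) 0 := by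
  induction l using List.reverseRecOn with
  | nil => simp [numaraUnuGo]
  | append_singleton l c ih =>
    rw [List.reverse_append, List.foldl_append]
    simp only [List.reverse_cons, List.reverse_nil, List.nil_append, List.foldl_cons,
      List.foldl_nil]
    by_cases h : c = 0
    · simp [numaraUnuGo, h]
    · simp only [numaraUnuGo, if_neg h, List.singleton_append]
      rw [numaraUnuGo_shift, ih]
      ring

-- ===== VERDICT (by name: the statement is the Claim_ definition above) =====
theorem numaraUnu_spec : Claim_equal_numaraUnu := by
  intro linie _
  unfold Spec_numaraUnu numaraUnu numaraUnu_alt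
  rw [slice_rev]
  exact main_eq linie
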